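-- pv_equiv track=rewrite | github.com/polmki123/SONMAT_DEEP | Deep_model/package.py | Slice_test_datalist
-- ===== SOURCE A (Python) =====
-- def Slice_test_datalist(test_datalist, test_label_datalist):
--     Test_Concat_datalist = []
--     for i in range(len(test_datalist)):
--         Test_Concat_datalist.append([test_datalist[i], test_label_datalist[i]])
--     Test_Concat_test_tolist = []
--     for group in chunker(Test_Concat_datalist, 8):
--         Test_Concat_test_tolist.append(group)
--
--     return Test_Concat_test_tolist
--
-- def chunker(seq, size):
--     return (seq[pos:pos + size] for pos in range(0, len(seq), size))
-- ===== SOURCE B (Python) =====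
-- def Slice_test_datalist(test_datalist, test_label_datalist):
--     result = []
--     current = []
--     for i in range(len(test_datalist)):
--         current.append([test_datalist[i], test_label_datalist[i]])
--         if len(current) == 8:
--             result.append(current)
--             current = []
--     if current:
--         result.append(current)
--     return result
-- ===== Notes on version B (the rewrite author's own statement) =====
-- stated objective: alternative
-- what changed: Replaces A's two-phase build-the-full-pair-list-then-slice-it-by-a-step-8-range approach with a single streaming pass that accumulates the current chunk and flushes it whenever it reaches 8 elements.
import Mathlib
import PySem

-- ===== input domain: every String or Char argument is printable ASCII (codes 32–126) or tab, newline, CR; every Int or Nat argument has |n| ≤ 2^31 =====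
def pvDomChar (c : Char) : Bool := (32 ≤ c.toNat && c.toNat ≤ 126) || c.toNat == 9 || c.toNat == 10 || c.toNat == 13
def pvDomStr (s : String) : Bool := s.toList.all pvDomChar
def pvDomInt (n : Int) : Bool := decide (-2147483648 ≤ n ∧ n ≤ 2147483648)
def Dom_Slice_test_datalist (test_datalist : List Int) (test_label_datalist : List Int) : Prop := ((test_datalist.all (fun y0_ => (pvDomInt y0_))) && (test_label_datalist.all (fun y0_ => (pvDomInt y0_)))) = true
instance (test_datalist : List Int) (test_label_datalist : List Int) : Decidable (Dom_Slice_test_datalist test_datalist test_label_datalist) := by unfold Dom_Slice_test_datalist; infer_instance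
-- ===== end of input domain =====

-- B replaces A's two-phase "build the full pair list, then slice it with a step-8 range" with a
-- single streaming pass that flushes the current chunk every 8 elements (alternative decomposition, same cost).

-- ===== PORT A =====
def Slice_test_datalist (test_datalist : List Int) (test_label_datalist : List Int) : List (List (List Int)) :=
  let concat := (PySem.List.pyRange 0 (test_datalist.length : Int) 1).foldl
    (fun acc i => acc ++ [[PySem.List.pyGetD test_datalist i 0, PySem.List.pyGetD test_label_datalist i 0]]) []
  (PySem.List.pyRange 0 (concat.length : Int) 8).foldl
    (fun acc pos => acc ++ [PySem.List.slice concat (some pos) (some (pos + 8))]) []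

-- ===== PORT B =====
def Slice_test_datalist_alt (test_datalist : List Int) (test_label_datalist : List Int) : List (List (List Int)) :=
  let st := (PySem.List.pyRange 0 (test_datalist.length : Int) 1).foldl
    (fun (st : List (List (List Int)) × List (List Int)) i =>
      let cur := st.2 ++ [[PySem.List.pyGetD test_datalist i 0, PySem.List.pyGetD test_label_datalist i 0]]
      if cur.length = 8 then (st.1 ++ [cur], ([] : List (List Int))) else (st.1, cur)) ([], [])
  if st.2 = [] then st.1 else st.1 ++ [st.2]

-- ===== PRECONDITION & SPEC =====
-- Pre_ excludes exactly the inputs on which the Python A raises IndexError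
-- (a label list shorter than the data list); B raises there too.
def Pre_Slice_test_datalist (test_datalist : List Int) (test_label_datalist : List Int) : Prop :=
  test_datalist.length ≤ test_label_datalist.length
instance (test_datalist : List Int) (test_label_datalist : List Int) : Decidable (Pre_Slice_test_datalist test_datalist test_label_datalist) := by unfold Pre_Slice_test_datalist; infer_instance

def pvWitness_Slice_test_datalist : List Int × List Int := ([1, 2, 3], [4, 5, 6, 7])

def Spec_Slice_test_datalist (test_datalist : List Int) (test_label_datalist : List Int) (out : List (List (List Int))) : Prop := out = Slice_test_datalist_alt test_datalist test_label_datalist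
instance (test_datalist : List Int) (test_label_datalist : List Int) (out : List (List (List Int))) : Decidable (Spec_Slice_test_datalist test_datalist test_label_datalist out) := by unfold Spec_Slice_test_datalist; infer_instance

-- ===== CLAIM (what is proved, stated in full; the proofs are below) =====
def Claim_equal_Slice_test_datalist : Prop := ∀ (test_datalist : List Int) (test_label_datalist : List Int), Dom_Slice_test_datalist test_datalist test_label_datalist → Pre_Slice_test_datalist test_datalist test_label_datalist → Spec_Slice_test_datalist test_datalist test_label_datalist (Slice_test_datalist test_datalist test_label_datalist)

-- ===== LEMMAS AND PROOFS =====

-- Reference chunking: split a list into consecutive chunks of 8 (last one possibly shorter).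
def chunk8 : List (List Int) → List (List (List Int))
  | [] => []
  | x :: t => (x :: t.take 7) :: chunk8 (t.drop 7)
  termination_by s => s.length
  decreasing_by simp

theorem chunk8_nil : chunk8 [] = [] := by simp only [chunk8]

theorem chunk8_cons (x : List Int) (t : List (List Int)) :
    chunk8 (x :: t) = (x :: t.take 7) :: chunk8 (t.drop 7) := by simp only [chunk8]

theorem chunk8_append_of_length_eq (c t : List (List Int)) (h : c.length = 8) :
    chunk8 (c ++ t) = c :: chunk8 t := by
  cases c with
  | nil => simp at h
  | cons y u =>
    have hu : u.length = 7 := by simp at h; omega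
    rw [List.cons_append, chunk8_cons, List.take_left' hu, List.drop_left' hu]

-- A's step-8 slicing fold, rewritten over List.range, computes chunk8.
theorem afold : ∀ (n : ℕ) (s : List (List Int)) (acc : List (List (List Int))), s.length ≤ n →
    (List.range ((((s.length : ℤ) + 7) / 8).toNat)).foldl
      (fun a k => a ++ [List.take 8 (List.drop (8 * k) s)]) acc = acc ++ chunk8 s := by
  intro n
  induction n with
  | zero =>
    intro s acc h
    have hs : s = [] := List.eq_nil_of_length_eq_zero (Nat.le_zero.mp h)
    subst hs
    rw [chunk8_nil]
    simp
  | succ n ih =>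
    intro s acc h
    cases hs : s with
    | nil => rw [chunk8_nil]; simp
    | cons x t =>
      subst hs
      have hcount : (((((x :: t).length : ℤ)) + 7) / 8).toNat
          = ((((List.drop 8 (x :: t)).length : ℤ) + 7) / 8).toNat + 1 := by
        simp only [List.length_drop, List.length_cons]
        omega
      rw [hcount, List.range_succ_eq_map, List.foldl_cons, List.foldl_map]
      have hbody : (fun (a : List (List (List Int))) (k : ℕ) =>
            a ++ [List.take 8 (List.drop (8 * Nat.succ k) (x :: t))])
          = (fun a k => a ++ [List.take 8 (List.drop (8 * k) (List.drop 8 (x :: t)))]) := by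
        funext a k
        have h88 : 8 * Nat.succ k = 8 + 8 * k := by omega
        rw [h88, ← List.drop_drop]
      have hlen : (List.drop 8 (x :: t)).length ≤ n := by
        simp only [List.length_drop, List.length_cons]
        simp only [List.length_cons] at h
        omega
      rw [hbody, ih (List.drop 8 (x :: t)) _ hlen]
      have h0 : List.take 8 (List.drop (8 * 0) (x :: t)) = x :: List.take 7 t := rfl
      have hd : List.drop 8 (x :: t) = List.drop 7 t := rfl
      rw [h0, hd, chunk8_cons]
      simp

-- The pyRange/slice form of A's second loop computes chunk8.
theorem sliceFold (s : List (List Int)) (acc : List (List (List Int))) :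
    (PySem.List.pyRange 0 (s.length : Int) 8).foldl
      (fun a pos => a ++ [PySem.List.slice s (some pos) (some (pos + 8))]) acc = acc ++ chunk8 s := by
  rw [PySem.List.pyRange_of_pos 0 (s.length : Int) (by norm_num)]
  have hcount : (List.range (if (0 : ℤ) < (s.length : ℤ) then (((s.length : ℤ) - 0 + 8 - 1) / 8).toNat else 0))
      = List.range ((((s.length : ℤ) + 7) / 8).toNat) := by
    congr 1
    split_ifs with h
    · omega
    · omega
  rw [hcount, List.foldl_map]
  have hbody : (fun (a : List (List (List Int))) (k : ℕ) =>
        a ++ [PySem.List.slice s (some (0 + 8 * (k : ℤ))) (some (0 + 8 * (k : ℤ) + 8))])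
      = (fun a k => a ++ [List.take 8 (List.drop (8 * k) s)]) := by
    funext a k
    have h2 : (0 : ℤ) + 8 * (k : ℤ) + 8 = ((8 * k : ℕ) : ℤ) + ((8 : ℕ) : ℤ) := by push_cast; ring
    have h1 : (0 : ℤ) + 8 * (k : ℤ) = ((8 * k : ℕ) : ℤ) := by push_cast; ring
    rw [h2, h1, PySem.List.slice_natCast_add]
  rw [hbody]
  exact afold s.length s acc le_rfl

-- B's streaming fold computes chunk8 of the current chunk followed by the remaining input.
theorem bfold : ∀ (s : List (List Int)) (res : List (List (List Int))) (cur : List (List Int)),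
    cur.length < 8 →
    (if (s.foldl (fun (st : List (List (List Int)) × List (List Int)) x =>
          let cur := st.2 ++ [x]
          if cur.length = 8 then (st.1 ++ [cur], ([] : List (List Int))) else (st.1, cur)) (res, cur)).2 = []
     then (s.foldl (fun (st : List (List (List Int)) × List (List Int)) x =>
          let cur := st.2 ++ [x]
          if cur.length = 8 then (st.1 ++ [cur], ([] : List (List Int))) else (st.1, cur)) (res, cur)).1
     else (s.foldl (fun (st : List (List (List Int)) × List (List Int)) x =>
          let cur := st.2 ++ [x]
          if cur.length = 8 then (st.1 ++ [cur], ([] : List (List Int))) else (st.1, cur)) (res, cur)).1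
       ++ [(s.foldl (fun (st : List (List (List Int)) × List (List Int)) x =>
          let cur := st.2 ++ [x]
          if cur.length = 8 then (st.1 ++ [cur], ([] : List (List Int))) else (st.1, cur)) (res, cur)).2])
    = res ++ chunk8 (cur ++ s) := by
  intro s
  induction s with
  | nil =>
    intro res cur hcur
    cases hc : cur with
    | nil => simp [chunk8_nil]
    | cons y u =>
      subst hc
      simp only [List.foldl_nil, List.append_nil]
      rw [if_neg (by simp)]
      have h1 : List.take 7 u = u := List.take_of_length_le (by simp at hcur; omega)
      have h2 : List.drop 7 u = [] := List.drop_of_length_le (by simp at hcur; omega)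
      rw [chunk8_cons, h1, h2, chunk8_nil]
  | cons x t ih =>
    intro res cur hcur
    simp only [List.foldl_cons]
    by_cases h8 : (cur ++ [x]).length = 8
    · simp only [if_pos h8]
      rw [ih (res ++ [cur ++ [x]]) [] (by simp)]
      have heq : cur ++ x :: t = (cur ++ [x]) ++ t := by simp
      rw [heq, chunk8_append_of_length_eq _ _ h8]
      simp
    · simp only [if_neg h8]
      have hlt : (cur ++ [x]).length < 8 := by
        simp only [List.length_append, List.length_cons, List.length_nil] at h8 ⊢
        omega
      rw [ih res (cur ++ [x]) hlt]
      have heq : (cur ++ [x]) ++ t = cur ++ x :: t := by simp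
      rw [heq]

-- ===== VERDICT (by name: the statement is the Claim_ definition above) =====
theorem Slice_test_datalist_spec : Claim_equal_Slice_test_datalist := by
  intro d l _hdom _hpre
  unfold Spec_Slice_test_datalist Slice_test_datalist Slice_test_datalist_alt
  have hA1 : (PySem.List.pyRange 0 (d.length : Int) 1).foldl
      (fun acc i => acc ++ [[PySem.List.pyGetD d i 0, PySem.List.pyGetD l i 0]]) []
      = (List.range d.length).map (fun k => [d.getD k 0, l.getD k 0]) := by
    rw [PySem.List.foldl_append_singleton_eq_map
      (fun i => [PySem.List.pyGetD d i 0, PySem.List.pyGetD l i 0])]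
    rw [PySem.List.pyRange_zero_nat, List.map_map]
    simp [Function.comp, PySem.List.pyGetD_natCast]
  have hB1 : (PySem.List.pyRange 0 (d.length : Int) 1).foldl
      (fun (st : List (List (List Int)) × List (List Int)) i =>
        let cur := st.2 ++ [[PySem.List.pyGetD d i 0, PySem.List.pyGetD l i 0]]
        if cur.length = 8 then (st.1 ++ [cur], ([] : List (List Int))) else (st.1, cur)) ([], [])
      = ((List.range d.length).map (fun k => [d.getD k 0, l.getD k 0])).foldl
        (fun (st : List (List (List Int)) × List (List Int)) x =>
          let cur := st.2 ++ [x]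
          if cur.length = 8 then (st.1 ++ [cur], ([] : List (List Int))) else (st.1, cur)) ([], []) := by
    rw [PySem.List.pyRange_zero_nat, List.foldl_map, List.foldl_map]
    simp only [PySem.List.pyGetD_natCast]
  simp only [hA1, hB1]
  rw [sliceFold]
  rw [bfold ((List.range d.length).map (fun k => [d.getD k 0, l.getD k 0])) [] [] (by norm_num)]
  simp
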